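-- pv_equiv track=rewrite | github.com/kokila24m/MultiHop-QA-Project | main.py | build_evidence_chains
-- ===== SOURCE A (Python) =====
-- from itertools import combinations, islice
-- from typing import List, Dict, Any, Optional, Tuple
--
-- MAX_CHAINS_PER_QUERY = 64         # safety limit to avoid explosion
--
-- def build_evidence_chains(
--     top_indices: List[int],
--     chain_length: int,
--     max_chains: int = MAX_CHAINS_PER_QUERY,
-- ) -> List[List[int]]:
--     if chain_length <= 1:
--         return [[i] for i in top_indices[:max_chains]]
--
--     all_combos = combinations(top_indices, chain_length)
--     chains = list(islice(all_combos, max_chains))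
--     return [list(c) for c in chains]
-- ===== SOURCE B (Python) =====
-- MAX_CHAINS_PER_QUERY = 64
--
-- def build_evidence_chains(top_indices, chain_length, max_chains=MAX_CHAINS_PER_QUERY):
--     if chain_length <= 1:
--         return [[i] for i in top_indices[:max_chains]]
--     n = len(top_indices)
--     out = []
--     # depth-first search over include/skip decisions with an explicit stack;
--     # a frame is (start, chosen, chain) where chain is a reversed linked list
--     # (value, parent) of the values chosen so far; the include child is pushed
--     # last so it is popped first, which yields lexicographic order
--     stack = [(0, 0, None)]
--     while stack and len(out) < max_chains:
--         start, chosen, chain = stack.pop()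
--         if chosen == chain_length:
--             row = []
--             while chain is not None:
--                 v, chain = chain
--                 row.append(v)
--             row.reverse()
--             out.append(row)
--         elif n - start < chain_length - chosen:
--             continue
--         else:
--             stack.append((start + 1, chosen, chain))
--             stack.append((start + 1, chosen + 1, (top_indices[start], chain)))
--     return out
-- ===== Notes on version B (the rewrite author's own statement) =====
-- stated objective: alternative
-- what changed: Replaced the itertools.combinations + islice pipeline with an explicit-stack depth-first search over include/skip decisions whose frames share prefixes as reversed linked lists, stopping once max_chains chains are collected.
-- outside the precondition, e.g. on build_evidence_chains([1, 2, 3], 2, -1): A raises ValueError, B returns []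
import Mathlib
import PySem

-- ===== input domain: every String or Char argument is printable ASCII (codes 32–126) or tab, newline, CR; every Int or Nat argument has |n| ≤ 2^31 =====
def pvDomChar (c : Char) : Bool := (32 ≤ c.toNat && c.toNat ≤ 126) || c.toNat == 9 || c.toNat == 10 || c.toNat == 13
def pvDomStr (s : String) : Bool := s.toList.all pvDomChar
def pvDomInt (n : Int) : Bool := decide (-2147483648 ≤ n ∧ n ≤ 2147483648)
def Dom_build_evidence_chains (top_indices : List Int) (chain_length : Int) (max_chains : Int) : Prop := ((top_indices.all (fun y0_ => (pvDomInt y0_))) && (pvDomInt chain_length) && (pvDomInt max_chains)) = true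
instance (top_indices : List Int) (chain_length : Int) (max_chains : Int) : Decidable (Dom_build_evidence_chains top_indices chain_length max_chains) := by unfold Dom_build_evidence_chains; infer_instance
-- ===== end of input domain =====

-- B replaces A's itertools.combinations + islice pipeline with an explicit-stack
-- depth-first search over include/skip decisions, prefixes kept as reversed linked
-- lists, stopping once max_chains chains are collected (objective: alternative).

-- ===== PORT A =====
-- itertools.combinations(top_indices, r): full list in lexicographic order (islice takes the prefix)
def pyCombinations : List Int → Nat → List (List Int)
  | _, 0 => [[]]
  | [], _ + 1 => []
  | x :: xs, r + 1 => (pyCombinations xs r).map (x :: ·) ++ pyCombinations xs (r + 1)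

def build_evidence_chains (top_indices : List Int) (chain_length : Int) (max_chains : Int) : List (List Int) :=
  if chain_length ≤ 1 then
    (PySem.List.slice top_indices none (some max_chains)).map (fun i => [i])
  else
    -- islice(all_combos, max_chains); a negative max_chains raises ValueError (excluded by Pre_)
    (pyCombinations top_indices chain_length.toNat).take max_chains.toNat

-- ===== PORT B =====
-- Source B's while loop over the explicit stack; a frame (start, chosen, chain) carries the
-- reversed linked list `chain` of chosen values (Python's nested (value, parent) tuples,
-- ported as a List used cons-wise only); the row reconstruction walk + row.reverse() is
-- chain.reverse.  `fuel` only makes the loop structurally total (it never runs out when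
-- called from build_evidence_chains_alt, as the proof below shows); top_indices[start] is
-- ported as getD: on every frame the loop reaches, the guard n - start ≥ k - chosen ≥ 1
-- puts start in range.
def dfsLoop (ti : List Int) (k m : Int) : Nat → List (Nat × Nat × List Int) → List (List Int) → List (List Int)
  | 0, _, out => out
  | _ + 1, [], out => out
  | fuel + 1, (start, chosen, chain) :: rest, out =>
    if m ≤ (out.length : Int) then out
    else if (chosen : Int) = k then dfsLoop ti k m fuel rest (out ++ [chain.reverse])
    else if (ti.length : Int) - (start : Int) < k - (chosen : Int) then dfsLoop ti k m fuel rest out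
    else dfsLoop ti k m fuel
      ((start + 1, chosen + 1, ti.getD start 0 :: chain) :: (start + 1, chosen, chain) :: rest) out

def build_evidence_chains_alt (top_indices : List Int) (chain_length : Int) (max_chains : Int) : List (List Int) :=
  if chain_length ≤ 1 then
    (PySem.List.slice top_indices none (some max_chains)).map (fun i => [i])
  else
    dfsLoop top_indices chain_length max_chains (3 ^ top_indices.length + 1) [(0, 0, [])] []

-- ===== PRECONDITION & SPEC =====
-- Pre_ excludes exactly the inputs where A raises: chain_length > 1 with a negative max_chains
-- (islice rejects a negative stop with ValueError); B returns [] there.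
def Pre_build_evidence_chains (top_indices : List Int) (chain_length : Int) (max_chains : Int) : Prop :=
  chain_length ≤ 1 ∨ 0 ≤ max_chains
instance (top_indices : List Int) (chain_length : Int) (max_chains : Int) : Decidable (Pre_build_evidence_chains top_indices chain_length max_chains) := by unfold Pre_build_evidence_chains; infer_instance

def pvWitness_build_evidence_chains : List Int × Int × Int := ([1, 2, 3, 4], 2, 3)

def Spec_build_evidence_chains (top_indices : List Int) (chain_length : Int) (max_chains : Int) (out : List (List Int)) : Prop := out = build_evidence_chains_alt top_indices chain_length max_chains
instance (top_indices : List Int) (chain_length : Int) (max_chains : Int) (out : List (List Int)) : Decidable (Spec_build_evidence_chains top_indices chain_length max_chains out) := by unfold Spec_build_evidence_chains; infer_instance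

-- ===== CLAIM (what is proved, stated in full; the proofs are below) =====
def Claim_equal_build_evidence_chains : Prop := ∀ (top_indices : List Int) (chain_length : Int) (max_chains : Int), Dom_build_evidence_chains top_indices chain_length max_chains → Pre_build_evidence_chains top_indices chain_length max_chains → Spec_build_evidence_chains top_indices chain_length max_chains (build_evidence_chains top_indices chain_length max_chains)

-- ===== LEMMAS AND PROOFS =====

theorem pyCombinations_zero (xs : List Int) : pyCombinations xs 0 = [[]] := by
  cases xs <;> rfl

theorem pyCombinations_nil_of_lt (xs : List Int) : ∀ r : Nat, xs.length < r → pyCombinations xs r = [] := by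
  induction xs with
  | nil =>
    intro r h
    cases r with
    | zero => simp at h
    | succ r => rfl
  | cons x tail ih =>
    intro r h
    cases r with
    | zero => simp at h
    | succ r =>
      simp only [List.length_cons] at h
      rw [pyCombinations, ih r (by omega), ih (r + 1) (by omega)]
      rfl

-- what a frame denotes: the combinations it will eventually contribute, in order
def frameSem (ti : List Int) (k : Int) (f : Nat × Nat × List Int) : List (List Int) :=
  (pyCombinations (ti.drop f.1) (k - (f.2.1 : Int)).toNat).map (fun co => f.2.2.reverse ++ co)

-- fuel potential of a stack: 3^(remaining positions) per frame
def stackPot (ti : List Int) (stack : List (Nat × Nat × List Int)) : Nat :=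
  (stack.map (fun f => 3 ^ (ti.length - f.1))).sum

theorem dfsLoop_eq (ti : List Int) (k m : Int) :
    ∀ (fuel : Nat) (stack : List (Nat × Nat × List Int)) (out : List (List Int)),
      (∀ f ∈ stack, ((f.2.1 : Int) ≤ k)) →
      stackPot ti stack ≤ fuel →
      dfsLoop ti k m fuel stack out
        = out ++ (stack.flatMap (frameSem ti k)).take (m.toNat - out.length) := by
  intro fuel
  induction fuel with
  | zero =>
    intro stack out _ hpot
    cases stack with
    | nil => simp [dfsLoop]
    | cons f rest =>
      exfalso
      have h1 : 1 ≤ 3 ^ (ti.length - f.1) := Nat.one_le_pow _ _ (by norm_num)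
      simp only [stackPot, List.map_cons, List.sum_cons, Nat.le_zero] at hpot
      omega
  | succ fuel ih =>
    intro stack out hinv hpot
    cases stack with
    | nil => simp [dfsLoop]
    | cons f rest =>
      obtain ⟨s, c, chain⟩ := f
      have hc : (c : Int) ≤ k := hinv (s, c, chain) (List.mem_cons_self ..)
      have hinv' : ∀ f ∈ rest, ((f.2.1 : Int) ≤ k) :=
        fun f hf => hinv f (List.mem_cons_of_mem _ hf)
      have h1 : 1 ≤ 3 ^ (ti.length - s) := Nat.one_le_pow _ _ (by norm_num)
      have hpot' : stackPot ti rest ≤ fuel := by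
        simp only [stackPot, List.map_cons, List.sum_cons] at hpot ⊢
        omega
      rw [dfsLoop]
      by_cases hm : m ≤ (out.length : Int)
      · rw [if_pos hm]
        have h0 : m.toNat - out.length = 0 := by omega
        simp [h0]
      · rw [if_neg hm]
        have hM : 1 ≤ m.toNat - out.length := by omega
        by_cases hck : (c : Int) = k
        · rw [if_pos hck]
          have hsem : frameSem ti k (s, c, chain) = [chain.reverse] := by
            have h0 : (k - (c : Int)).toNat = 0 := by omega
            simp [frameSem, h0, pyCombinations_zero]
          rw [ih rest (out ++ [chain.reverse]) hinv' hpot']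
          obtain ⟨u, hu⟩ : ∃ u, m.toNat - out.length = u + 1 :=
            ⟨m.toNat - out.length - 1, by omega⟩
          have hlen : m.toNat - (out ++ [chain.reverse]).length = u := by
            simp only [List.length_append, List.length_cons, List.length_nil]
            omega
          rw [List.flatMap_cons, hsem, List.singleton_append, hu, List.take_succ_cons, hlen]
          simp
        · rw [if_neg hck]
          have hclt : (c : Int) < k := lt_of_le_of_ne hc hck
          by_cases hg : (ti.length : Int) - (s : Int) < k - (c : Int)
          · rw [if_pos hg]
            have hsem : frameSem ti k (s, c, chain) = [] := by
              rw [frameSem, pyCombinations_nil_of_lt]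
              · simp
              · simp only [List.length_drop]
                omega
            rw [ih rest out hinv' hpot', List.flatMap_cons, hsem, List.nil_append]
          · rw [if_neg hg]
            have hs : s < ti.length := by omega
            have hdrop : ti.drop s = ti[s] :: ti.drop (s + 1) := List.drop_eq_getElem_cons hs
            have hx : ti.getD s 0 = ti[s] := List.getD_eq_getElem ti 0 hs
            have ht : (k - (c : Int)).toNat = (k - (c : Int) - 1).toNat + 1 := by omega
            have ht' : (k - ((c + 1 : Nat) : Int)).toNat = (k - (c : Int) - 1).toNat := by
              push_cast
              omega
            have hsem : frameSem ti k (s, c, chain)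
                = frameSem ti k (s + 1, c + 1, ti.getD s 0 :: chain)
                  ++ frameSem ti k (s + 1, c, chain) := by
              simp only [frameSem, hdrop, ht, ht', pyCombinations, hx]
              rw [List.map_append, List.map_map]
              congr 1
              refine List.map_congr_left fun co _ => ?_
              simp [Function.comp, List.reverse_cons, List.append_assoc]
            have hinv2 : ∀ f ∈ ((s + 1, c + 1, ti.getD s 0 :: chain)
                :: (s + 1, c, chain) :: rest), ((f.2.1 : Int) ≤ k) := by
              intro f hf
              rcases List.mem_cons.mp hf with rfl | hf
              · push_cast
                omega
              · rcases List.mem_cons.mp hf with rfl | hf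
                · exact hc
                · exact hinv' f hf
            have hpot2 : stackPot ti ((s + 1, c + 1, ti.getD s 0 :: chain)
                :: (s + 1, c, chain) :: rest) ≤ fuel := by
              simp only [stackPot, List.map_cons, List.sum_cons] at hpot ⊢
              have he : ti.length - s = (ti.length - (s + 1)) + 1 := by omega
              rw [he, pow_succ] at hpot
              have h2 : 1 ≤ 3 ^ (ti.length - (s + 1)) := Nat.one_le_pow _ _ (by norm_num)
              omega
            rw [ih _ out hinv2 hpot2]
            simp only [List.flatMap_cons, hsem, List.append_assoc]

-- ===== VERDICT (by name: the statement is the Claim_ definition above) =====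
theorem build_evidence_chains_spec : Claim_equal_build_evidence_chains := by
  intro ti cl mc _ hpre
  unfold Spec_build_evidence_chains build_evidence_chains build_evidence_chains_alt
  split
  · rfl
  · rename_i hcl
    have hmc : 0 ≤ mc := by
      rcases hpre with h | h
      · exact absurd h hcl
      · exact h
    have hcl2 : 2 ≤ cl := by omega
    rw [dfsLoop_eq ti cl mc _ [(0, 0, [])] []
      (by intro f hf; simp at hf; rw [hf]; simp; omega)
      (by simp [stackPot])]
    simp [frameSem]
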